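-- pv_equiv track=rewrite | github.com/mgjenero/AdventOfCode-2023 | day05_part2.py | update_intervals
-- ===== SOURCE A (Python) =====
-- def update_intervals(intervals, mapping):
--     new_intervals = []
--
--     while intervals:
--         start, end = intervals.pop()
--         found_overlap = False
--         for dest_start, source_start, length in mapping:
--             new_start = max(start, source_start)
--             new_end = min(end, source_start + length)
--             if new_start < new_end:
--                 # overlapping interval stored in new_intervals after mapping
--                 # non-overlapping intervals(if they exist) will be stored in intervals
--                 new_intervals.append(
--                     (new_start + (dest_start - source_start), new_end + (dest_start - source_start)))
--                 found_overlap = True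
--                 if new_end < end:
--                     intervals.append((new_end, end))
--                 if start < new_start:
--                     intervals.append((start, new_start))
--                 # break the loop to update current interval with some not mapped interval
--                 break
--         # if no overlapping interval found, just append the current interval
--         if not found_overlap:
--             new_intervals.append((start, end))
--     intervals = merge_intervals(new_intervals)
--     return intervals
--
-- def merge_intervals(intervals):
--     intervals.sort(key=lambda x: x[0])
--     merged = []
--     curr = intervals[0]
--     for start, end in intervals[1:]:
--         if start <= curr[1]:
--             curr = (curr[0], max(curr[1], end))
--         else:
--             merged.append(curr)
--             curr = (start, end)
--     merged.append(curr)
--     return merged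
-- ===== SOURCE B (Python) =====
-- def update_intervals(intervals, mapping):
--     # Pure re-implementation: structural recursion per interval instead of a
--     # mutating LIFO worklist; does not mutate its arguments (A empties `intervals`).
--     def chop(start, end):
--         for dest_start, source_start, length in mapping:
--             lo = max(start, source_start)
--             hi = min(end, source_start + length)
--             if lo < hi:
--                 out = [(lo + dest_start - source_start, hi + dest_start - source_start)]
--                 if start < lo:
--                     out.extend(chop(start, lo))
--                 if hi < end:
--                     out.extend(chop(hi, end))
--                 return out
--         return [(start, end)]
--
--     pieces = []
--     for iv in reversed(intervals):
--         pieces.extend(chop(iv[0], iv[1]))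
--     pieces.sort(key=lambda p: p[0])
--     merged = []
--     for s, e in pieces:
--         if merged and s <= merged[-1][1]:
--             merged[-1] = (merged[-1][0], max(merged[-1][1], e))
--         else:
--             merged.append((s, e))
--     return merged
-- ===== Notes on version B (the rewrite author's own statement) =====
-- stated objective: alternative
-- what changed: Replaces A's mutating LIFO-worklist loop (pop/push on the argument list) by a pure structural recursion per interval gathered with a flatten over the reversed input, and A's curr-accumulator merge by an in-place last-element merge; B does not mutate its arguments (A empties `intervals` in place; the equivalence is about the return value). A reordering re-implementation (e.g. the sorted-mapping sweep) would change A's output on overlapping mapping entries and on reversed (start>end) intervals, so the exact splitting order is kept.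
-- crash fix: A raises IndexError on intervals = [] (merge_intervals indexes an empty list); B returns [] there. — e.g. on update_intervals([], [(3, 1, 2)]): A raises IndexError, B returns []
import Mathlib
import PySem

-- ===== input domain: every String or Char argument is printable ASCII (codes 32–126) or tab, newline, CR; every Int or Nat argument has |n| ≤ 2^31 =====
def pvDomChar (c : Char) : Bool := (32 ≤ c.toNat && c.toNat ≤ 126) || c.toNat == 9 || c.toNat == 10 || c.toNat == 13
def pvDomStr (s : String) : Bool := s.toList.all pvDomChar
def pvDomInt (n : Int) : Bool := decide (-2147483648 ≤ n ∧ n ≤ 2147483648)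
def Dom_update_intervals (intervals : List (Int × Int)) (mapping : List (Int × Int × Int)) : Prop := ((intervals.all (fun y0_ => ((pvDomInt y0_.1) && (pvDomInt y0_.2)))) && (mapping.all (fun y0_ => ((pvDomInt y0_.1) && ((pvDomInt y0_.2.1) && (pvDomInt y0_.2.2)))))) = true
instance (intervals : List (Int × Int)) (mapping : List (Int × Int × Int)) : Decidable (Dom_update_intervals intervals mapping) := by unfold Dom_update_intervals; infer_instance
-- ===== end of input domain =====

-- B replaces A's mutating LIFO-worklist loop by pure structural recursion per interval
-- (and A's curr-accumulator merge by a last-element merge); return value only: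
-- A empties its `intervals` argument in place, B does not mutate it.

-- ===== PORT A =====

-- A's inner `for dest_start, source_start, length in mapping` with `break`:
-- returns the first entry whose source range overlaps (start, fin), if any.
def pvScanA (start fin : Int) : List (Int × Int × Int) → Option (Int × Int × Int)
  | [] => none
  | (d, s, l) :: rest =>
    if max start s < min fin (s + l) then some (d, s, l) else pvScanA start fin rest

-- termination measure for A's worklist loop (cited by pvLoopA's decreasing_by)
def pvPhi (xs : List (Int × Int)) : Nat :=
  (xs.map (fun p => 2 * (p.2 - p.1).toNat + 1)).sum

theorem pvPhi_append (a b : List (Int × Int)) : pvPhi (a ++ b) = pvPhi a + pvPhi b := by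
  simp [pvPhi]

theorem pvScanA_lt {start fin : Int} {m : List (Int × Int × Int)} {d s l : Int}
    (h : pvScanA start fin m = some (d, s, l)) : max start s < min fin (s + l) := by
  induction m with
  | nil => simp [pvScanA] at h
  | cons e rest ih =>
    obtain ⟨ed, es, el⟩ := e
    rw [pvScanA] at h
    by_cases hc : max start es < min fin (es + el)
    · rw [if_pos hc] at h
      simp only [Option.some.injEq, Prod.mk.injEq] at h
      obtain ⟨rfl, rfl, rfl⟩ := h
      exact hc
    · rw [if_neg hc] at h
      exact ih h

-- A's `while intervals:` loop; `intervals.pop()` takes the LAST element,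
-- leftover pieces are pushed back onto the worklist.
def pvLoopA (mapping : List (Int × Int × Int)) (intervals : List (Int × Int))
    (acc : List (Int × Int)) : List (Int × Int) :=
  match hlast : intervals.getLast? with
  | none => acc
  | some (start, fin) =>
    match hs : pvScanA start fin mapping with
    | none => pvLoopA mapping intervals.dropLast (acc ++ [(start, fin)])
    | some (d, s, l) =>
      pvLoopA mapping
        (intervals.dropLast
          ++ (if min fin (s + l) < fin then [(min fin (s + l), fin)] else [])
          ++ (if start < max start s then [(start, max start s)] else []))
        (acc ++ [(max start s + (d - s), min fin (s + l) + (d - s))])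
termination_by pvPhi intervals
decreasing_by
  · obtain ⟨l', rfl⟩ := List.getLast?_eq_some_iff.mp hlast
    rw [List.dropLast_concat, pvPhi_append]
    simp [pvPhi]
  · obtain ⟨l', rfl⟩ := List.getLast?_eq_some_iff.mp hlast
    have hlt := pvScanA_lt hs
    have h1 : start ≤ max start s := le_max_left _ _
    have h2 : min fin (s + l) ≤ fin := min_le_left _ _
    rw [List.dropLast_concat, pvPhi_append, pvPhi_append, pvPhi_append]
    split_ifs <;> simp [pvPhi] <;> omega

-- merge_intervals' for-loop with the running `curr`
def pvMergeLoopA (curr : Int × Int) : List (Int × Int) → List (Int × Int)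
  | [] => [curr]
  | (s, e) :: rest =>
    if s ≤ curr.2 then pvMergeLoopA (curr.1, max curr.2 e) rest
    else curr :: pvMergeLoopA (s, e) rest

-- merge_intervals; `[]` branch is unreachable under Pre_ (Python raises IndexError there)
def pvMergeA (xs : List (Int × Int)) : List (Int × Int) :=
  match PySem.List.sorted xs (fun p => p.1) false with
  | [] => []
  | c :: rest => pvMergeLoopA c rest

def update_intervals (intervals : List (Int × Int)) (mapping : List (Int × Int × Int)) : List (Int × Int) :=
  pvMergeA (pvLoopA mapping intervals [])

-- ===== PORT B =====

-- B's recursive chop: `full` is the captured mapping, `ms` the part of it the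
-- for-loop has still to inspect; recursive calls restart on the full mapping.
def pvChopB (full : List (Int × Int × Int)) (start fin : Int) :
    List (Int × Int × Int) → List (Int × Int)
  | [] => [(start, fin)]
  | (d, s, l) :: rest =>
    if hov : max start s < min fin (s + l) then
      (max start s + (d - s), min fin (s + l) + (d - s)) ::
        ((if hL : start < max start s then pvChopB full start (max start s) full else []) ++
         (if hR : min fin (s + l) < fin then pvChopB full (min fin (s + l)) fin full else []))
    else pvChopB full start fin rest
termination_by ms => (fin - start).toNat * (full.length + 1) + ms.length
decreasing_by
  · have h2 : max start s < fin := lt_of_lt_of_le hov (min_le_left _ _)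
    have key : (max start s - start).toNat + 1 ≤ (fin - start).toNat := by omega
    have hm := Nat.mul_le_mul_right (full.length + 1) key
    have hexp : ((max start s - start).toNat + 1) * (full.length + 1)
        = (max start s - start).toNat * (full.length + 1) + (full.length + 1) := by ring
    simp only [List.length_cons]
    omega
  · have h3 : start < min fin (s + l) := lt_of_le_of_lt (le_max_left _ _) hov
    have key : (fin - min fin (s + l)).toNat + 1 ≤ (fin - start).toNat := by omega
    have hm := Nat.mul_le_mul_right (full.length + 1) key
    have hexp : ((fin - min fin (s + l)).toNat + 1) * (full.length + 1)
        = (fin - min fin (s + l)).toNat * (full.length + 1) + (full.length + 1) := by ring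
    simp only [List.length_cons]
    omega
  · simp only [List.length_cons]
    omega

-- pieces of all intervals, processed in A's worklist order (last interval first)
def pvPiecesB (intervals : List (Int × Int)) (mapping : List (Int × Int × Int)) : List (Int × Int) :=
  intervals.reverse.flatMap (fun p => pvChopB mapping p.1 p.2 mapping)

-- B's merge loop: mutates merged[-1] instead of carrying `curr`
def pvMergeB (acc : List (Int × Int)) : List (Int × Int) → List (Int × Int)
  | [] => acc
  | (s, e) :: rest =>
    match acc.getLast? with
    | some c =>
      if s ≤ c.2 then pvMergeB (acc.dropLast ++ [(c.1, max c.2 e)]) rest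
      else pvMergeB (acc ++ [(s, e)]) rest
    | none => pvMergeB [(s, e)] rest

def update_intervals_alt (intervals : List (Int × Int)) (mapping : List (Int × Int × Int)) : List (Int × Int) :=
  pvMergeB [] (PySem.List.sorted (pvPiecesB intervals mapping) (fun p => p.1) false)

-- ===== PRECONDITION & SPEC =====
-- Pre_ excludes only intervals = [], on which A's merge step raises IndexError.
def Pre_update_intervals (intervals : List (Int × Int)) (mapping : List (Int × Int × Int)) : Prop :=
  intervals ≠ []
instance (intervals : List (Int × Int)) (mapping : List (Int × Int × Int)) : Decidable (Pre_update_intervals intervals mapping) := by unfold Pre_update_intervals; infer_instance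

def pvWitness_update_intervals : (List (Int × Int)) × (List (Int × Int × Int)) :=
  ([(0, 5)], [(10, 1, 2)])

-- A raises IndexError on intervals = [] (merge_intervals indexes an empty list); B returns [] there.
def Raises_update_intervals (intervals : List (Int × Int)) (mapping : List (Int × Int × Int)) : Prop :=
  intervals = []
instance (intervals : List (Int × Int)) (mapping : List (Int × Int × Int)) : Decidable (Raises_update_intervals intervals mapping) := by unfold Raises_update_intervals; infer_instance
def pvRaiseWitness_update_intervals : (List (Int × Int)) × (List (Int × Int × Int)) := ([], [(3, 1, 2)])
def pvRaiseWitnessOut_update_intervals : List (Int × Int) := []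

def Spec_update_intervals (intervals : List (Int × Int)) (mapping : List (Int × Int × Int)) (out : List (Int × Int)) : Prop := out = update_intervals_alt intervals mapping
instance (intervals : List (Int × Int)) (mapping : List (Int × Int × Int)) (out : List (Int × Int)) : Decidable (Spec_update_intervals intervals mapping out) := by unfold Spec_update_intervals; infer_instance

-- ===== CLAIM (what is proved, stated in full; the proofs are below) =====
def Claim_equal_update_intervals : Prop := ∀ (intervals : List (Int × Int)) (mapping : List (Int × Int × Int)), Dom_update_intervals intervals mapping → Pre_update_intervals intervals mapping → Spec_update_intervals intervals mapping (update_intervals intervals mapping)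

def Claim_raises_update_intervals : Prop := (∀ (intervals : List (Int × Int)) (mapping : List (Int × Int × Int)), Dom_update_intervals intervals mapping → Raises_update_intervals intervals mapping → ¬ Pre_update_intervals intervals mapping) ∧ (Dom_update_intervals (pvRaiseWitness_update_intervals.1) (pvRaiseWitness_update_intervals.2) ∧ Raises_update_intervals (pvRaiseWitness_update_intervals.1) (pvRaiseWitness_update_intervals.2) ∧ update_intervals_alt (pvRaiseWitness_update_intervals.1) (pvRaiseWitness_update_intervals.2) = pvRaiseWitnessOut_update_intervals)

-- ===== LEMMAS AND PROOFS =====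

-- if the scan finds no overlap, chop keeps the interval
theorem pvChopB_of_scan_none {start fin : Int} {full ms : List (Int × Int × Int)}
    (h : pvScanA start fin ms = none) : pvChopB full start fin ms = [(start, fin)] := by
  induction ms with
  | nil => rw [pvChopB]
  | cons e rest ih =>
    obtain ⟨d, s, l⟩ := e
    rw [pvScanA] at h
    rw [pvChopB]
    by_cases hc : max start s < min fin (s + l)
    · rw [if_pos hc] at h
      exact absurd h (by simp)
    · rw [if_neg hc] at h
      rw [dif_neg hc]
      exact ih h

-- if the scan finds its first overlap at (d, s, l), chop unfolds to that split
theorem pvChopB_of_scan_some {start fin d s l : Int} {full ms : List (Int × Int × Int)}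
    (h : pvScanA start fin ms = some (d, s, l)) :
    pvChopB full start fin ms =
      (max start s + (d - s), min fin (s + l) + (d - s)) ::
        ((if start < max start s then pvChopB full start (max start s) full else []) ++
         (if min fin (s + l) < fin then pvChopB full (min fin (s + l)) fin full else [])) := by
  induction ms with
  | nil => simp [pvScanA] at h
  | cons e rest ih =>
    obtain ⟨ed, es, el⟩ := e
    rw [pvScanA] at h
    rw [pvChopB]
    by_cases hc : max start es < min fin (es + el)
    · rw [if_pos hc] at h
      simp only [Option.some.injEq, Prod.mk.injEq] at h
      obtain ⟨rfl, rfl, rfl⟩ := h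
      rw [dif_pos hc]
      simp only [dite_eq_ite]
    · rw [if_neg hc] at h
      rw [dif_neg hc]
      exact ih h

theorem pvChopB_ne_nil (full : List (Int × Int × Int)) (start fin : Int)
    (ms : List (Int × Int × Int)) : pvChopB full start fin ms ≠ [] := by
  cases hs : pvScanA start fin ms with
  | none => simp [pvChopB_of_scan_none hs]
  | some e =>
    obtain ⟨d, s, l⟩ := e
    simp [pvChopB_of_scan_some hs]

-- A's worklist loop produces exactly B's pieces (same list, same order)
theorem pvLoopA_eq_pieces (mapping : List (Int × Int × Int)) :
    ∀ (intervals acc : List (Int × Int)),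
      pvLoopA mapping intervals acc = acc ++ pvPiecesB intervals mapping := by
  intro intervals acc
  fun_induction pvLoopA mapping intervals acc with
  | case1 ivs acc hlast =>
    obtain rfl : ivs = [] := List.getLast?_eq_none_iff.mp hlast
    simp [pvPiecesB]
  | case2 ivs acc start fin hlast hs ih =>
    obtain ⟨l', rfl⟩ := List.getLast?_eq_some_iff.mp hlast
    rw [ih, List.dropLast_concat]
    simp only [pvPiecesB, List.reverse_append, List.reverse_cons, List.reverse_nil,
      List.nil_append, List.flatMap_cons, List.singleton_append]
    rw [pvChopB_of_scan_none hs]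
    simp
  | case3 ivs acc start fin hlast d s l hs ih =>
    simp only [dite_eq_ite] at ih
    obtain ⟨l', rfl⟩ := List.getLast?_eq_some_iff.mp hlast
    rw [ih, List.dropLast_concat]
    simp only [pvPiecesB, List.reverse_append, List.reverse_cons, List.reverse_nil,
      List.nil_append, List.flatMap_cons, List.flatMap_append, List.singleton_append]
    rw [pvChopB_of_scan_some (full := mapping) hs]
    split_ifs <;> simp

-- B's in-place last-element merge equals A's curr-accumulator merge
theorem pvMergeB_eq_loopA :
    ∀ (l : List (Int × Int)) (acc0 : List (Int × Int)) (c : Int × Int),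
      pvMergeB (acc0 ++ [c]) l = acc0 ++ pvMergeLoopA c l := by
  intro l
  induction l with
  | nil => intro acc0 c; rw [pvMergeB, pvMergeLoopA]
  | cons p rest ih =>
    intro acc0 c
    obtain ⟨s, e⟩ := p
    rw [pvMergeB, pvMergeLoopA]
    simp only [List.getLast?_concat, List.dropLast_concat]
    split
    · exact ih acc0 (c.1, max c.2 e)
    · have := ih (acc0 ++ [c]) (s, e)
      simpa using this

-- ===== VERDICT (by name: the statement is the Claim_ definition above) =====
theorem update_intervals_spec : Claim_equal_update_intervals := by
  intro intervals mapping _hdom hpre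
  unfold Spec_update_intervals update_intervals update_intervals_alt pvMergeA
  rw [pvLoopA_eq_pieces, List.nil_append]
  have hne : pvPiecesB intervals mapping ≠ [] := by
    obtain ⟨q, qs, hq⟩ := List.exists_cons_of_ne_nil (by simpa using (List.reverse_eq_nil_iff).not.mpr hpre : intervals.reverse ≠ [])
    unfold pvPiecesB
    rw [hq]
    simp only [List.flatMap_cons]
    intro hcontra
    exact pvChopB_ne_nil mapping q.1 q.2 mapping (List.append_eq_nil_iff.mp hcontra).1
  have hsne : PySem.List.sorted (pvPiecesB intervals mapping) (fun p => p.1) false ≠ [] :=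
    fun hcontra => hne ((PySem.List.sorted_eq_nil_iff _ _ _).mp hcontra)
  obtain ⟨c, rest, hcr⟩ := List.exists_cons_of_ne_nil hsne
  rw [hcr]
  rw [pvMergeB, List.getLast?_nil]
  have := pvMergeB_eq_loopA rest [] c
  simpa using this.symm

theorem update_intervals_raises : Claim_raises_update_intervals := by
  unfold Claim_raises_update_intervals
  refine ⟨fun intervals mapping _ h => ?_, by decide⟩
  unfold Raises_update_intervals at h
  simp [Pre_update_intervals, h]

-- witness self-check: B's port indeed returns pvRaiseWitnessOut_ at the raise witness
theorem update_intervals_raises_witness_ok :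
    update_intervals_alt pvRaiseWitness_update_intervals.1 pvRaiseWitness_update_intervals.2
      = pvRaiseWitnessOut_update_intervals := by
  have h := update_intervals_raises
  unfold Claim_raises_update_intervals at h
  exact h.2.2.2
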